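-- pv_equiv track=rewrite | github.com/WitchElaina/Beijing-bus-helper | route_suggest.py | min_station
-- ===== SOURCE A (Python) =====
-- def min_station(all_path: list):
--     """
--     返回经过站点最少的路径, 如有平行方案全部输出, 所有结果存储在列表中
--     eg. [[best1], [best2]] or [[best]]
--     get minimum change_line route
--     :param all_path: 所有备选路径 all routes in list
--     :return: 最优方案列表 best route(s) in list
--     """
--     ret = []
--     counts = []
--     for content in all_path:
--         counts.append(len(content))
--     for content in all_path:
--         if len(content) == min(counts):
--             ret.append(content)
--
--     return ret
-- ===== SOURCE B (Python) =====
-- def min_station(all_path: list):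
--     best_len = None
--     ret = []
--     for route in all_path:
--         n = len(route)
--         if best_len is None or n < best_len:
--             best_len = n
--             ret = [route]
--         elif n == best_len:
--             ret.append(route)
--     return ret
-- ===== Notes on version B (the rewrite author's own statement) =====
-- stated objective: faster
-- what changed: Replaced A's two passes (build counts list, then filter against min(counts) recomputed in the loop condition) by a single online scan maintaining the best length and the current winners list.
import Mathlib
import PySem

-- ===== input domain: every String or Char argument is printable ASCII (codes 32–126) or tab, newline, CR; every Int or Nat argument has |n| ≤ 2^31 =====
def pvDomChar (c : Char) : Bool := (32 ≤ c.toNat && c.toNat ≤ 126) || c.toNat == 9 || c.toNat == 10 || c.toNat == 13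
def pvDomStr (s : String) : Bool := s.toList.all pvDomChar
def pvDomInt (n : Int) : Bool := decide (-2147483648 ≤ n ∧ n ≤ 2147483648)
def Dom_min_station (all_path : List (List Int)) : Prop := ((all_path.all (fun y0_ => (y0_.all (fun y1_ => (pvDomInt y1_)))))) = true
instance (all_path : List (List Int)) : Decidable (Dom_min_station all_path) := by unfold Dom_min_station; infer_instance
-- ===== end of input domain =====

-- B replaces A's two-pass "build the counts list, then filter against min(counts)" by a
-- single online scan keeping the best length and the current winners (return value only).

-- ===== PORT A =====
def min_station (all_path : List (List Int)) : List (List Int) :=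
  let counts : List Int :=
    all_path.foldl (fun cs content => cs ++ [(content.length : Int)]) []
  all_path.foldl
    (fun ret content =>
      if PySem.List.min? counts (fun x => x) = some (content.length : Int) then
        ret ++ [content]
      else ret) []

-- ===== PORT B =====
def min_station_alt (all_path : List (List Int)) : List (List Int) :=
  (all_path.foldl
    (fun (st : Option Int × List (List Int)) route =>
      let n : Int := route.length
      match st.1 with
      | none => (some n, [route])
      | some b =>
        if n < b then (some n, [route])
        else if n = b then (st.1, st.2 ++ [route])
        else st)
    (none, [])).2

-- ===== PRECONDITION & SPEC =====
def Spec_min_station (all_path : List (List Int)) (out : List (List Int)) : Prop := out = min_station_alt all_path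
instance (all_path : List (List Int)) (out : List (List Int)) : Decidable (Spec_min_station all_path out) := by unfold Spec_min_station; infer_instance

-- ===== CLAIM (what is proved, stated in full; the proofs are below) =====
def Claim_equal_min_station : Prop := ∀ (all_path : List (List Int)), Dom_min_station all_path → Spec_min_station all_path (min_station all_path)

-- ===== LEMMAS AND PROOFS =====

-- B's loop step, named for the lemmas below
def pvStep (st : Option Int × List (List Int)) (route : List Int) : Option Int × List (List Int) :=
  let n : Int := route.length
  match st.1 with
  | none => (some n, [route])
  | some b =>
    if n < b then (some n, [route])
    else if n = b then (st.1, st.2 ++ [route])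
    else st

lemma pvStep_fold (xs : List (List Int)) :
    ∀ (m : Int) (acc : List (List Int)),
    xs.foldl pvStep (some m, acc)
      = (some ((xs.map (fun c => (c.length : Int))).foldl min m),
         (if (xs.map (fun c => (c.length : Int))).foldl min m = m then acc else [])
           ++ xs.filter (fun c => (c.length : Int) = (xs.map (fun c => (c.length : Int))).foldl min m)) := by
  induction xs with
  | nil => intro m acc; simp
  | cons x xs ih =>
    intro m acc
    have hmin := PySem.List.foldl_min_le (xs.map (fun c => (c.length : Int)))
    by_cases h1 : (x.length : Int) < m
    · have hstep : List.foldl pvStep (some m, acc) (x :: xs)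
          = xs.foldl pvStep (some (x.length : Int), [x]) := by
        simp [pvStep, h1]
      rw [hstep, ih]
      have hm : min m (x.length : Int) = (x.length : Int) := by omega
      have hle := (hmin (x.length : Int)).1
      have hne : (xs.map (fun c => (c.length : Int))).foldl min (x.length : Int) ≠ m := by omega
      by_cases h2 : (xs.map (fun c => (c.length : Int))).foldl min (x.length : Int) = (x.length : Int) <;>
        simp [List.foldl_cons, hm, hne, h2, List.filter_cons] <;> omega
    · by_cases h2 : (x.length : Int) = m
      · have hstep : List.foldl pvStep (some m, acc) (x :: xs)
            = xs.foldl pvStep (some m, acc ++ [x]) := by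
          simp [pvStep, h2]
        rw [hstep, ih]
        have hm : min m (x.length : Int) = m := by omega
        by_cases h3 : (xs.map (fun c => (c.length : Int))).foldl min m = m
        · simp [List.foldl_cons, h3, h2]
        · simp [List.foldl_cons, h3, List.filter_cons, h2]
          omega
      · have hstep : List.foldl pvStep (some m, acc) (x :: xs)
            = xs.foldl pvStep (some m, acc) := by
          simp [pvStep, h1, h2]
        rw [hstep, ih]
        have hm : min m (x.length : Int) = m := by omega
        have hle := (hmin m).1
        have hne : (x.length : Int) ≠ (xs.map (fun c => (c.length : Int))).foldl min m := by omega
        simp [List.foldl_cons, hm, hne]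

-- ===== VERDICT (by name: the statement is the Claim_ definition above) =====
theorem min_station_spec : Claim_equal_min_station := by
  intro all_path _
  simp only [Spec_min_station, min_station, min_station_alt]
  cases all_path with
  | nil => simp
  | cons x xs =>
    rw [show ((fun (st : Option Int × List (List Int)) route =>
        let n : Int := route.length
        match st.1 with
        | none => (some n, [route])
        | some b =>
          if n < b then (some n, [route])
          else if n = b then (st.1, st.2 ++ [route])
          else st) = pvStep) from rfl]
    have hB : List.foldl pvStep (none, []) (x :: xs)
        = xs.foldl pvStep (some (x.length : Int), [x]) := by
      simp [pvStep]
    rw [hB, pvStep_fold, PySem.List.foldl_append_singleton_eq_map]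
    simp only [List.nil_append, List.map_cons, PySem.List.min?_id_cons, List.foldl_cons,
      PySem.List.foldl_append_ite_eq_filter]
    by_cases h : (xs.map (fun c => (c.length : Int))).foldl min (x.length : Int) = (x.length : Int)
    · simp [h, eq_comm]
    · simp [h, eq_comm]
      omega
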